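-- pv_equiv track=rewrite | github.com/Snowflake-Labs/CMSgov-pricing-transparency | src/python/in_network_udtf/negotiation_arrangements_dagbuilder.py | reshape_tasks_to_matrix
-- ===== SOURCE A (Python) =====
-- def reshape_tasks_to_matrix(p_tasks_count: int ,p_parallel: int):
--     t = p_tasks_count
--     m = -1
--     n = -1
--     # Keep the matrix in 20 X 10 matrix
--     for x in range(p_parallel):
--         for y in range(p_parallel):
--             if x*y == t:
--                 m = max(x ,y)
--                 n = min(x, y)
--                 break
--         if m != -1:
--             break
--
--     #choosen_shape = f'{m} X {n} => {t}'
--     task_matrix_shape = (m,n)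
--     return task_matrix_shape
-- ===== SOURCE B (Python) =====
-- def reshape_tasks_to_matrix(p_tasks_count: int, p_parallel: int):
--     t = p_tasks_count
--     if t == 0:
--         return (0, 0) if p_parallel > 0 else (-1, -1)
--     if t < 0:
--         return (-1, -1)
--     for x in range(1, p_parallel):
--         if t % x == 0 and t // x < p_parallel:
--             y = t // x
--             return (max(x, y), min(x, y))
--     return (-1, -1)
-- ===== Notes on version B (the rewrite author's own statement) =====
-- stated objective: faster
-- what changed: Replaced the nested x,y scan over range(p_parallel)^2 by a single loop over x that tests divisibility and computes y = t // x directly, with the t==0 and t<0 rows answered up front.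
import Mathlib
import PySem

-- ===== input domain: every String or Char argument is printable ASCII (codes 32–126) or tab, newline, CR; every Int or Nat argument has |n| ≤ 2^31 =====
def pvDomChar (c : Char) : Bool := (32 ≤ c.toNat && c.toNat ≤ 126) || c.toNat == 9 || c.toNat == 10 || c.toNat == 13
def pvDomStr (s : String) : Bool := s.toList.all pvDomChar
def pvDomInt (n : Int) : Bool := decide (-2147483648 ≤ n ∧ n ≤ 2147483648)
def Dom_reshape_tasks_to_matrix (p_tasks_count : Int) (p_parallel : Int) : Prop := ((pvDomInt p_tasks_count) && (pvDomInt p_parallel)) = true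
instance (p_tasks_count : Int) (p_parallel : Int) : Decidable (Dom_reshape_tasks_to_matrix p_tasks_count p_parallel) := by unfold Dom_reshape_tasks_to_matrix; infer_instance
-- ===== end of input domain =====

-- B replaces A's nested O(p^2) scan by a single divisor loop (y = t // x); measured asymptotically faster.

-- ===== PORT A =====
-- inner 'for y in range(p_parallel): if x*y == t: m,n = max,min; break' — break encoded as Option
def pvAInner (t x : Int) (y : Nat) : Nat → Option (Int × Int)
  | 0 => none
  | fuel+1 =>
    if x * (y : Int) = t then some (max x (y : Int), min x (y : Int))
    else pvAInner t x (y+1) fuel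

-- outer 'for x in range(p_parallel): …; if m != -1: break' (m,n start at -1,-1)
def pvAOuter (t : Int) (p : Nat) (x : Nat) : Nat → Int × Int
  | 0 => (-1, -1)
  | fuel+1 =>
    match pvAInner t (x : Int) 0 p with
    | some r => r
    | none => pvAOuter t p (x+1) fuel

def reshape_tasks_to_matrix (p_tasks_count : Int) (p_parallel : Int) : List Int :=
  let r := pvAOuter p_tasks_count p_parallel.toNat 0 p_parallel.toNat
  [r.1, r.2]

-- ===== PORT B =====
-- 'for x in range(1, p_parallel): if t % x == 0 and t // x < p_parallel: return (max(x,y), min(x,y))'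
def pvBLoop (t p : Int) (x : Nat) : Nat → Int × Int
  | 0 => (-1, -1)
  | fuel+1 =>
    if PySem.Int.mod t (x : Int) = 0 ∧ PySem.Int.floordiv t (x : Int) < p then
      (max (x : Int) (PySem.Int.floordiv t (x : Int)),
       min (x : Int) (PySem.Int.floordiv t (x : Int)))
    else pvBLoop t p (x+1) fuel

def reshape_tasks_to_matrix_alt (p_tasks_count : Int) (p_parallel : Int) : List Int :=
  if p_tasks_count = 0 then
    (if 0 < p_parallel then [0, 0] else [-1, -1])
  else if p_tasks_count < 0 then [-1, -1]
  else
    let r := pvBLoop p_tasks_count p_parallel 1 (p_parallel - 1).toNat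
    [r.1, r.2]

-- ===== PRECONDITION & SPEC =====
def Spec_reshape_tasks_to_matrix (p_tasks_count : Int) (p_parallel : Int) (out : List Int) : Prop := out = reshape_tasks_to_matrix_alt p_tasks_count p_parallel
instance (p_tasks_count : Int) (p_parallel : Int) (out : List Int) : Decidable (Spec_reshape_tasks_to_matrix p_tasks_count p_parallel out) := by unfold Spec_reshape_tasks_to_matrix; infer_instance

-- ===== CLAIM (what is proved, stated in full; the proofs are below) =====
def Claim_equal_reshape_tasks_to_matrix : Prop := ∀ (p_tasks_count : Int) (p_parallel : Int), Dom_reshape_tasks_to_matrix p_tasks_count p_parallel → Spec_reshape_tasks_to_matrix p_tasks_count p_parallel (reshape_tasks_to_matrix p_tasks_count p_parallel)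

-- ===== LEMMAS AND PROOFS =====

theorem pvAInner_none (t x : Int) (fuel : Nat) :
    ∀ y0 : Nat, (∀ y : Nat, y0 ≤ y → y < y0 + fuel → x * (y : Int) ≠ t) →
    pvAInner t x y0 fuel = none := by
  induction fuel with
  | zero => intro y0 _; rfl
  | succ f ih =>
    intro y0 h
    simp only [pvAInner]
    rw [if_neg (h y0 Nat.le.refl (by omega))]
    exact ih (y0 + 1) (fun y hy1 hy2 => h y (by omega) (by omega))

theorem pvAInner_some (t x : Int) (fuel : Nat) :
    ∀ y0 ys : Nat, y0 ≤ ys → ys < y0 + fuel → x * (ys : Int) = t →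
    (∀ y : Nat, y0 ≤ y → y < ys → x * (y : Int) ≠ t) →
    pvAInner t x y0 fuel = some (max x (ys : Int), min x (ys : Int)) := by
  induction fuel with
  | zero => intro y0 ys h1 h2; omega
  | succ f ih =>
    intro y0 ys h1 h2 heq hmin
    simp only [pvAInner]
    by_cases h0 : x * (y0 : Int) = t
    · have : ys = y0 := by
        by_contra hne
        exact hmin y0 Nat.le.refl (by omega) h0
      subst this
      rw [if_pos h0]
    · rw [if_neg h0]
      have hne : y0 ≠ ys := fun h => h0 (h ▸ heq)
      exact ih (y0 + 1) ys (by omega) (by omega) heq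
        (fun y hy1 hy2 => hmin y (by omega) hy2)

-- for t < 0 the whole matrix scan finds nothing
theorem pvAOuter_neg (t : Int) (ht : t < 0) (p : Nat) (fuel : Nat) :
    ∀ x : Nat, pvAOuter t p x fuel = (-1, -1) := by
  induction fuel with
  | zero => intro x; rfl
  | succ f ih =>
    intro x
    simp only [pvAOuter]
    rw [pvAInner_none t (x : Int) p 0 (fun y _ _ => by
      have hx : (0:Int) ≤ (x : Int) := Int.natCast_nonneg x
      have hy : (0:Int) ≤ (y : Int) := Int.natCast_nonneg y
      nlinarith)]
    exact ih (x + 1)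

-- main loop alignment for t > 0: A's row x equals B's step x, for x ≥ 1
theorem pvLoop_eq (t p : Int) (ht : 0 < t) (fuel : Nat) :
    ∀ x : Nat, 1 ≤ x → pvAOuter t p.toNat x fuel = pvBLoop t p x fuel := by
  induction fuel with
  | zero => intro x _; rfl
  | succ f ih =>
    intro x hx
    have hx0 : (0:Int) < (x : Int) := by exact_mod_cast hx
    have hmod : PySem.Int.mod t (x : Int) = t % (x : Int) :=
      PySem.Int.mod_eq_emod_of_pos hx0
    have hdiv : PySem.Int.floordiv t (x : Int) = t / (x : Int) :=
      PySem.Int.floordiv_eq_ediv_of_pos hx0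
    simp only [pvAOuter, pvBLoop]
    by_cases hc : PySem.Int.mod t (x : Int) = 0 ∧ PySem.Int.floordiv t (x : Int) < p
    · obtain ⟨hm, hlt⟩ := hc
      rw [hmod] at hm
      rw [hdiv] at hlt
      have hdvd : (x : Int) ∣ t := Int.dvd_of_emod_eq_zero hm
      have hq : t / (x : Int) * (x : Int) = t := Int.ediv_mul_cancel hdvd
      have hq0 : 0 ≤ t / (x : Int) := Int.ediv_nonneg (le_of_lt ht) (le_of_lt hx0)
      set q := t / (x : Int) with hqdef
      have hys : ((q.toNat : Int)) = q := Int.toNat_of_nonneg hq0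
      have h1 : (x : Int) * (q.toNat : Int) = t := by rw [hys]; linarith [hq]
      have h2 : q.toNat < p.toNat := by omega
      rw [pvAInner_some t (x : Int) p.toNat 0 q.toNat (by omega) (by omega) h1
        (fun y _ hy2 => by
          intro habs
          have : (y : Int) = q := by
            have := mul_left_cancel₀ (ne_of_gt hx0) (habs.trans h1.symm)
            omega
          omega)]
      rw [if_pos ⟨by rw [hmod]; exact hm, by rw [hdiv]; exact hlt⟩]
      rw [hys, hdiv]
    · rw [pvAInner_none t (x : Int) p.toNat 0 (fun y _ hy2 => by
        intro habs
        apply hc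
        have hdvd : (x : Int) ∣ t := ⟨(y : Int), habs.symm⟩
        have hm : t % (x : Int) = 0 := Int.emod_eq_zero_of_dvd hdvd
        have hdq : t / (x : Int) = (y : Int) := by
          rw [← habs]
          exact Int.mul_ediv_cancel_left _ (ne_of_gt hx0)
        refine ⟨by rw [hmod]; exact hm, ?_⟩
        rw [hdiv, hdq]
        omega)]
      rw [if_neg hc]
      exact ih (x + 1) (by omega)

-- ===== VERDICT (by name: the statement is the Claim_ definition above) =====
theorem reshape_tasks_to_matrix_spec : Claim_equal_reshape_tasks_to_matrix := by
  intro t p _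
  unfold Spec_reshape_tasks_to_matrix reshape_tasks_to_matrix reshape_tasks_to_matrix_alt
  rcases lt_trichotomy t 0 with ht | ht | ht
  · -- t < 0 : no product of two nonnegatives equals t
    rw [pvAOuter_neg t ht p.toNat p.toNat 0]
    rw [if_neg (by omega), if_pos ht]
  · -- t = 0
    subst ht
    rw [if_pos rfl]
    by_cases hp : 0 < p
    · obtain ⟨f, hf⟩ : ∃ f, p.toNat = f + 1 := ⟨p.toNat - 1, by omega⟩
      rw [hf]
      simp only [pvAOuter]
      simp [pvAInner, hp]
    · have : p.toNat = 0 := by omega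
      rw [this]
      simp only [pvAOuter]
      rw [if_neg hp]
  · -- t > 0 : row x = 0 finds nothing, then rows align with B's loop
    rw [if_neg (by omega), if_neg (by omega)]
    by_cases hp : p ≤ 0
    · have h0 : p.toNat = 0 := by omega
      have h1 : (p - 1).toNat = 0 := by omega
      rw [h0, h1]
      rfl
    · replace hp : 0 < p := by omega
      obtain ⟨f, hf⟩ : ∃ f, p.toNat = f + 1 ∧ (p - 1).toNat = f := by
        refine ⟨p.toNat - 1, by omega, by omega⟩
      obtain ⟨hf1, hf2⟩ := hf
      rw [hf1, hf2]
      simp only [pvAOuter]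
      rw [pvAInner_none t ((0:Nat) : Int) (f + 1) 0 (fun y _ _ => by
        push_cast; omega)]
      rw [← hf1]
      exact congrArg (fun r : Int × Int => [r.1, r.2]) (pvLoop_eq t p ht f 1 (by omega))
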